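-- pv_equiv track=rewrite | github.com/sesezz/ATMProject | src/touch_detect_se.py | map_key
-- ===== SOURCE A (Python) =====
-- def map_key(wx, wy, x0, y0, btn_w, btn_h, gap_w, gap_h):
--     idx = 0
--     for r in range(4):
--         for c in range(4):
--             bx = x0 + c*(btn_w + gap_w)
--             by = y0 + r*(btn_h + gap_h)
--
--             if bx <= wx <= bx + btn_w and by <= wy <= by + btn_h:
--                 return idx
--             idx += 1
--     return None
-- ===== SOURCE B (Python) =====
-- def map_key(wx, wy, x0, y0, btn_w, btn_h, gap_w, gap_h):
--     col = None
--     for c in range(4):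
--         bx = x0 + c * (btn_w + gap_w)
--         if bx <= wx <= bx + btn_w:
--             col = c
--             break
--     row = None
--     for r in range(4):
--         by = y0 + r * (btn_h + gap_h)
--         if by <= wy <= by + btn_h:
--             row = r
--             break
--     if col is None or row is None:
--         return None
--     return row * 4 + col
-- ===== Notes on version B (the rewrite author's own statement) =====
-- stated objective: simpler
-- what changed: Replaced the 16-cell nested row-major scan with two independent 4-step first-match scans (one over columns for x, one over rows for y) combined as row*4+col, exploiting that the x-test depends only on the column and the y-test only on the row.
import Mathlib
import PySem

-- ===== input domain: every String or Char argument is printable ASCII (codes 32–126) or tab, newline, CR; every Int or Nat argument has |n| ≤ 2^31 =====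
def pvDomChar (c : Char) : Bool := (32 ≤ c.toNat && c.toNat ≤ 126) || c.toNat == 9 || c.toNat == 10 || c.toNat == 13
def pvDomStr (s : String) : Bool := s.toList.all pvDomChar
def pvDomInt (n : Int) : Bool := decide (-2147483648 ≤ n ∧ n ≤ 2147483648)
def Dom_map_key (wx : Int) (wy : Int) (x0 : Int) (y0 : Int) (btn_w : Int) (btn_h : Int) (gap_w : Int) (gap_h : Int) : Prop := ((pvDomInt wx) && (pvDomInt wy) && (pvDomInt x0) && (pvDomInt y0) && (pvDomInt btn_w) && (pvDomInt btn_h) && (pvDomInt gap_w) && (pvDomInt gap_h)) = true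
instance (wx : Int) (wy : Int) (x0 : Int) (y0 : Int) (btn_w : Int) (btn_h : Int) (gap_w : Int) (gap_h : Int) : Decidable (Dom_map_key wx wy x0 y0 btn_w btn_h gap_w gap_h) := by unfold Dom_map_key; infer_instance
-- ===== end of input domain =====

-- B replaces A's 16-cell row-major grid scan by two independent 4-step first-match scans
-- (column from the x-test, row from the y-test) combined as row*4+col; objective: simpler.
-- ===== PORT A =====
def map_key (wx : Int) (wy : Int) (x0 : Int) (y0 : Int) (btn_w : Int) (btn_h : Int) (gap_w : Int) (gap_h : Int) : Option Int :=
  ((PySem.List.pyRange 0 4 1).foldl (fun acc r =>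
    (PySem.List.pyRange 0 4 1).foldl (fun acc2 c =>
      match acc2.1 with
      | some v => (some v, acc2.2)
      | none =>
        let bx := x0 + c * (btn_w + gap_w)
        let by' := y0 + r * (btn_h + gap_h)
        if bx ≤ wx ∧ wx ≤ bx + btn_w ∧ by' ≤ wy ∧ wy ≤ by' + btn_h then
          (some acc2.2, acc2.2)
        else (none, acc2.2 + 1)) acc) ((none : Option Int), (0 : Int))).1

-- ===== PORT B =====
-- for-loop with break that leaves the first matching element (Source B's two scans)
def findFirst (p : Int → Bool) : List Int → Option Int
  | [] => none
  | x :: xs => if p x then some x else findFirst p xs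

def map_key_alt (wx : Int) (wy : Int) (x0 : Int) (y0 : Int) (btn_w : Int) (btn_h : Int) (gap_w : Int) (gap_h : Int) : Option Int :=
  let col := findFirst (fun c =>
    let bx := x0 + c * (btn_w + gap_w)
    decide (bx ≤ wx ∧ wx ≤ bx + btn_w)) (PySem.List.pyRange 0 4 1)
  let row := findFirst (fun r =>
    let by' := y0 + r * (btn_h + gap_h)
    decide (by' ≤ wy ∧ wy ≤ by' + btn_h)) (PySem.List.pyRange 0 4 1)
  match col, row with
  | some c, some r => some (r * 4 + c)
  | _, _ => none

-- ===== PRECONDITION & SPEC =====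
def Spec_map_key (wx : Int) (wy : Int) (x0 : Int) (y0 : Int) (btn_w : Int) (btn_h : Int) (gap_w : Int) (gap_h : Int) (out : Option Int) : Prop := out = map_key_alt wx wy x0 y0 btn_w btn_h gap_w gap_h
instance (wx : Int) (wy : Int) (x0 : Int) (y0 : Int) (btn_w : Int) (btn_h : Int) (gap_w : Int) (gap_h : Int) (out : Option Int) : Decidable (Spec_map_key wx wy x0 y0 btn_w btn_h gap_w gap_h out) := by unfold Spec_map_key; infer_instance

-- ===== CLAIM (what is proved, stated in full; the proofs are below) =====
def Claim_equal_map_key : Prop := ∀ (wx : Int) (wy : Int) (x0 : Int) (y0 : Int) (btn_w : Int) (btn_h : Int) (gap_w : Int) (gap_h : Int), Dom_map_key wx wy x0 y0 btn_w btn_h gap_w gap_h → Spec_map_key wx wy x0 y0 btn_w btn_h gap_w gap_h (map_key wx wy x0 y0 btn_w btn_h gap_w gap_h)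

-- ===== LEMMAS AND PROOFS =====

-- A's inner loop body, as a named step function (definitionally the lambda in map_key)
def stepA (wx wy x0 y0 bw bh gw gh r : Int) (acc2 : Option Int × Int) (c : Int) : Option Int × Int :=
  match acc2.1 with
  | some v => (some v, acc2.2)
  | none =>
    let bx := x0 + c * (bw + gw)
    let by' := y0 + r * (bh + gh)
    if bx ≤ wx ∧ wx ≤ bx + bw ∧ by' ≤ wy ∧ wy ≤ by' + bh then (some acc2.2, acc2.2)
    else (none, acc2.2 + 1)

-- value component of A's inner (column) loop started at index i with nothing found yet
def innerA (wx wy x0 y0 bw bh gw gh r : Int) : List Int → Int → Option Int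
  | [], _ => none
  | c :: cs, i =>
    if x0 + c * (bw + gw) ≤ wx ∧ wx ≤ x0 + c * (bw + gw) + bw ∧
        y0 + r * (bh + gh) ≤ wy ∧ wy ≤ y0 + r * (bh + gh) + bh
    then some i else innerA wx wy x0 y0 bw bh gw gh r cs (i + 1)

-- value of A's outer (row) loop started at index i with nothing found yet
def outA (wx wy x0 y0 bw bh gw gh : Int) : List Int → Int → Option Int
  | [], _ => none
  | r :: rs, i =>
    match innerA wx wy x0 y0 bw bh gw gh r [0, 1, 2, 3] i with
    | some v => some v
    | none => outA wx wy x0 y0 bw bh gw gh rs (i + 4)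

theorem stepA_found (wx wy x0 y0 bw bh gw gh r : Int) (l : List Int) (v i : Int) :
    l.foldl (stepA wx wy x0 y0 bw bh gw gh r) (some v, i) = (some v, i) := by
  induction l with
  | nil => rfl
  | cons c cs ih => exact ih

theorem foldl_inner (wx wy x0 y0 bw bh gw gh r : Int) (cs : List Int) (i : Int) :
    cs.foldl (stepA wx wy x0 y0 bw bh gw gh r) (none, i) =
      (innerA wx wy x0 y0 bw bh gw gh r cs i,
       (innerA wx wy x0 y0 bw bh gw gh r cs i).getD (i + cs.length)) := by
  induction cs generalizing i with
  | nil => simp [innerA]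
  | cons c cs ih =>
    rw [List.foldl_cons]
    by_cases h : x0 + c * (bw + gw) ≤ wx ∧ wx ≤ x0 + c * (bw + gw) + bw ∧
        y0 + r * (bh + gh) ≤ wy ∧ wy ≤ y0 + r * (bh + gh) + bh
    · have hs : stepA wx wy x0 y0 bw bh gw gh r (none, i) c = (some i, i) := by
        simp [stepA, h]
      rw [hs, stepA_found]
      simp [innerA, h]
    · have hs : stepA wx wy x0 y0 bw bh gw gh r (none, i) c = (none, i + 1) := by
        simp [stepA, h]
      rw [hs, ih]
      have harith : i + 1 + (cs.length : Int) = i + ((cs.length + 1 : Nat) : Int) := by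
        push_cast; ring
      rw [innerA, if_neg h, List.length_cons, harith]

theorem outer_found (wx wy x0 y0 bw bh gw gh : Int) (l : List Int) (v i : Int) :
    (l.foldl (fun acc r => ([0, 1, 2, 3] : List Int).foldl (stepA wx wy x0 y0 bw bh gw gh r) acc)
      (some v, i)) = (some v, i) := by
  induction l with
  | nil => rfl
  | cons r rs ih =>
    rw [List.foldl_cons, stepA_found]
    exact ih

theorem foldl_outer (wx wy x0 y0 bw bh gw gh : Int) (rows : List Int) (i : Int) :
    (rows.foldl (fun acc r => ([0, 1, 2, 3] : List Int).foldl (stepA wx wy x0 y0 bw bh gw gh r) acc)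
      (none, i)).1 = outA wx wy x0 y0 bw bh gw gh rows i := by
  induction rows generalizing i with
  | nil => rfl
  | cons r rs ih =>
    rw [List.foldl_cons, foldl_inner]
    cases h : innerA wx wy x0 y0 bw bh gw gh r [0, 1, 2, 3] i with
    | some v =>
      rw [outer_found]
      simp [outA, h]
    | none =>
      simp only [Option.getD_none, List.length_cons]
      rw [ih]
      simp only [outA, h]
      norm_num

-- a row's scan finds index i + (first matching column) iff the row's y-test holds
theorem innerA_char (wx wy x0 y0 bw bh gw gh r i : Int) :
    innerA wx wy x0 y0 bw bh gw gh r [0, 1, 2, 3] i =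
      if y0 + r * (bh + gh) ≤ wy ∧ wy ≤ y0 + r * (bh + gh) + bh then
        (findFirst (fun c => decide (x0 + c * (bw + gw) ≤ wx ∧ wx ≤ x0 + c * (bw + gw) + bw))
          [0, 1, 2, 3]).map (fun c => i + c)
      else none := by
  simp only [innerA, findFirst, decide_eq_true_eq]
  split_ifs <;>
    first
      | rfl
      | (exfalso; omega)
      | (simp only [Option.map_some, Option.some.injEq]; omega)

-- the whole row-major scan equals the two independent first-match scans combined
theorem outA_char (wx wy x0 y0 bw bh gw gh : Int) :
    outA wx wy x0 y0 bw bh gw gh [0, 1, 2, 3] 0 =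
      match findFirst (fun c => decide (x0 + c * (bw + gw) ≤ wx ∧ wx ≤ x0 + c * (bw + gw) + bw))
              [0, 1, 2, 3],
            findFirst (fun r => decide (y0 + r * (bh + gh) ≤ wy ∧ wy ≤ y0 + r * (bh + gh) + bh))
              [0, 1, 2, 3] with
      | some c, some r => some (r * 4 + c)
      | _, _ => none := by
  simp only [outA, innerA_char]
  cases hc : findFirst (fun c => decide (x0 + c * (bw + gw) ≤ wx ∧ wx ≤ x0 + c * (bw + gw) + bw))
      [0, 1, 2, 3] with
  | none =>
    simp only [Option.map_none]
    split_ifs <;> rfl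
  | some c =>
    simp only [Option.map_some]
    simp only [findFirst, decide_eq_true_eq]
    split_ifs <;> rfl

-- ===== VERDICT (by name: the statement is the Claim_ definition above) =====
theorem map_key_spec : Claim_equal_map_key := by
  intro wx wy x0 y0 btn_w btn_h gap_w gap_h _
  unfold Spec_map_key
  have hA : map_key wx wy x0 y0 btn_w btn_h gap_w gap_h =
      outA wx wy x0 y0 btn_w btn_h gap_w gap_h [0, 1, 2, 3] 0 := by
    unfold map_key
    rw [show PySem.List.pyRange 0 4 1 = ([0, 1, 2, 3] : List Int) from rfl]
    exact foldl_outer wx wy x0 y0 btn_w btn_h gap_w gap_h [0, 1, 2, 3] 0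
  rw [hA, outA_char]
  unfold map_key_alt
  rw [show PySem.List.pyRange 0 4 1 = ([0, 1, 2, 3] : List Int) from rfl]
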